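-- pv_equiv track=rewrite | github.com/TimoBbz/Projet-Doctolib | code_analyser/style.py | count_hooks
-- ===== SOURCE A (Python) =====
-- def count_hooks(string):
--     ratio_hooks = 0
--     for caracter in string:
--         if caracter == "[":
--             ratio_hooks += 1
--         elif caracter == "]":
--             ratio_hooks -= 1
--     return abs(ratio_hooks)
-- ===== SOURCE B (Python) =====
-- def count_hooks(string):
--     def balance(s):
--         if len(s) <= 1:
--             return 1 if s == "[" else (-1 if s == "]" else 0)
--         mid = len(s) // 2
--         return balance(s[:mid]) + balance(s[mid:])
--     return abs(balance(string))
-- ===== Notes on version B (the rewrite author's own statement) =====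
-- stated objective: alternative
-- what changed: Replaces A's single left-to-right accumulating pass with a divide-and-conquer recursion: the string's signed bracket balance is computed by splitting at the midpoint, recursing on both halves and adding the two balances (correct because the signed balance is additive over concatenation), with abs applied once at the top.
import Mathlib
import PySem

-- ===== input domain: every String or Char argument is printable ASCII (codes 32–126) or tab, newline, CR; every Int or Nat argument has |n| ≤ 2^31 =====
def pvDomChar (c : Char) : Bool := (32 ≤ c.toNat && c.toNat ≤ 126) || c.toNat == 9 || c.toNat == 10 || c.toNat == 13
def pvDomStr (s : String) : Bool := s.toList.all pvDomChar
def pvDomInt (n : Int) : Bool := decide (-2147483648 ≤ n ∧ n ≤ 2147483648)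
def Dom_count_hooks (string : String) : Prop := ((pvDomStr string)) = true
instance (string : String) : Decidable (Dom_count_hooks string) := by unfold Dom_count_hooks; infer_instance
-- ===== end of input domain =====

-- B replaces A's single accumulating pass by a divide-and-conquer recursion on string halves (alternative decomposition, same cost).

-- ===== PORT A =====
-- literal port of A: one pass, one accumulator, then abs
def count_hooks (string : String) : Int :=
  let ratio_hooks : Int :=
    string.toList.foldl
      (fun ratio_hooks caracter =>
        if caracter == '[' then ratio_hooks + 1
        else if caracter == ']' then ratio_hooks - 1
        else ratio_hooks) 0
  |ratio_hooks|

-- ===== PORT B =====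
-- literal port of B's helper 'balance': s[:mid] / s[mid:] with 0 ≤ mid ≤ len(s) are exactly take/drop
def pvBalance (s : List Char) : Int :=
  if s.length ≤ 1 then
    (if s = ['['] then 1 else if s = [']'] then -1 else 0)
  else
    pvBalance (s.take (s.length / 2)) + pvBalance (s.drop (s.length / 2))
termination_by s.length
decreasing_by
  · simp only [List.length_take]; omega
  · simp only [List.length_drop]; omega

def count_hooks_alt (string : String) : Int :=
  |pvBalance string.toList|

-- ===== PRECONDITION & SPEC =====
def Spec_count_hooks (string : String) (out : Int) : Prop := out = count_hooks_alt string
instance (string : String) (out : Int) : Decidable (Spec_count_hooks string out) := by unfold Spec_count_hooks; infer_instance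

-- ===== CLAIM (what is proved, stated in full; the proofs are below) =====
def Claim_equal_count_hooks : Prop := ∀ (string : String), Dom_count_hooks string → Spec_count_hooks string (count_hooks string)

-- ===== LEMMAS AND PROOFS =====

-- the divide-and-conquer balance equals count '[' minus count ']'
theorem pvBalance_eq (l : List Char) :
    pvBalance l = (l.count '[' : Int) - (l.count ']' : Int) := by
  induction hn : l.length using Nat.strong_induction_on generalizing l with
  | _ n ih =>
    by_cases hs : l.length ≤ 1
    · rw [pvBalance, if_pos hs]
      interval_cases h : l.length
      · simp [List.length_eq_zero_iff.mp h]
      · obtain ⟨c, rfl⟩ := List.length_eq_one_iff.mp h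
        by_cases h1 : c = '['
        · simp [h1]
        · by_cases h2 : c = ']' <;> simp [h1, h2]
    · rw [pvBalance, if_neg hs]
      subst hn
      rw [ih (l.take (l.length / 2)).length (by simp; omega) _ rfl,
          ih (l.drop (l.length / 2)).length (by simp; omega) _ rfl]
      conv_rhs => rw [← List.take_append_drop (l.length / 2) l]
      simp only [List.count_append]
      push_cast
      ring

-- A's fold computes the same difference of counts
theorem foldl_hooks (l : List Char) (a : Int) :
    l.foldl (fun ratio_hooks caracter =>
        if caracter == '[' then ratio_hooks + 1
        else if caracter == ']' then ratio_hooks - 1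
        else ratio_hooks) a
      = a + (l.count '[' : Int) - (l.count ']' : Int) := by
  induction l generalizing a with
  | nil => simp
  | cons h t ih =>
      simp only [List.foldl_cons, ih, List.count_cons]
      by_cases h1 : h = '['
      · simp [h1]; ring
      · by_cases h2 : h = ']'
        · rw [if_neg (by simpa using h1), if_pos (by simpa using h2)]; simp [h2]; ring
        · simp [h1, h2]

-- ===== VERDICT (by name: the statement is the Claim_ definition above) =====
theorem count_hooks_spec : Claim_equal_count_hooks := by
  intro s _
  unfold Spec_count_hooks count_hooks count_hooks_alt
  rw [pvBalance_eq, foldl_hooks]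
  simp
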